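-- pv_equiv track=rewrite | github.com/Vahram99/Auto | autopt/utils.py | aliases
-- ===== SOURCE A (Python) =====
-- def aliases(name):
--     groups = (
--               ('cl', 'classifier', 'classification'),
--               ('reg', 'regressor', 'regression'),
--               ('n_jobs', 'num_cores', 'thread_count', 'n_cores'),
--               ('verbose', 'verbosity'),
--               ('random_state', 'seed', 'random_seed')
--               )
--
--     for group in groups:
--         if name in group:
--             return group
--
--     return ()
-- ===== SOURCE B (Python) =====
-- # Sorted (alias, group) table, kept in lexicographic order of the alias,
-- # answered by binary search instead of a linear scan over the groups.
-- _TABLE = (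
--     ('cl',           ('cl', 'classifier', 'classification')),
--     ('classification', ('cl', 'classifier', 'classification')),
--     ('classifier',   ('cl', 'classifier', 'classification')),
--     ('n_cores',      ('n_jobs', 'num_cores', 'thread_count', 'n_cores')),
--     ('n_jobs',       ('n_jobs', 'num_cores', 'thread_count', 'n_cores')),
--     ('num_cores',    ('n_jobs', 'num_cores', 'thread_count', 'n_cores')),
--     ('random_seed',  ('random_state', 'seed', 'random_seed')),
--     ('random_state', ('random_state', 'seed', 'random_seed')),
--     ('reg',          ('reg', 'regressor', 'regression')),
--     ('regression',   ('reg', 'regressor', 'regression')),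
--     ('regressor',    ('reg', 'regressor', 'regression')),
--     ('seed',         ('random_state', 'seed', 'random_seed')),
--     ('thread_count', ('n_jobs', 'num_cores', 'thread_count', 'n_cores')),
--     ('verbose',      ('verbose', 'verbosity')),
--     ('verbosity',    ('verbose', 'verbosity')),
-- )
--
--
-- def aliases(name):
--     lo, hi = 0, len(_TABLE)
--     while lo < hi:
--         mid = (lo + hi) // 2
--         key, group = _TABLE[mid]
--         if key < name:
--             lo = mid + 1
--         elif name < key:
--             hi = mid
--         else:
--             return group
--     return ()
-- ===== Notes on version B (the rewrite author's own statement) =====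
-- stated objective: alternative
-- what changed: B stores the aliases in a single (name, group) table sorted by name and answers by binary search, instead of A's linear scan over the group tuples with a membership test in each.
import Mathlib
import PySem

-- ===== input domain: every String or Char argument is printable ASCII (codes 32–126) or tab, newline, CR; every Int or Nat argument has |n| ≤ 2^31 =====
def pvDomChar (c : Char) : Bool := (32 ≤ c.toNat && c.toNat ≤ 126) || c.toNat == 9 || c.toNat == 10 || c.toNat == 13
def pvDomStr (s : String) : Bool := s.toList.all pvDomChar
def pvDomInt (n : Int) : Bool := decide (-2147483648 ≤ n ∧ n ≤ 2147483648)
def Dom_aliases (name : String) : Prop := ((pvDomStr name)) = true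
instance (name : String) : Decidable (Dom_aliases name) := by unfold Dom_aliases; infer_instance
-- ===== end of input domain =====

-- B replaces A's linear scan over the group tuples by binary search in a name-sorted (name, group) table (objective: alternative).

-- ===== PORT A =====
def aliasGroups : List (List String) :=
  [ ["cl", "classifier", "classification"],
    ["reg", "regressor", "regression"],
    ["n_jobs", "num_cores", "thread_count", "n_cores"],
    ["verbose", "verbosity"],
    ["random_state", "seed", "random_seed"] ]

-- the 'for group in groups: if name in group: return group' loop
def aliasesLoop (name : String) : List (List String) → List String
  | [] => []
  | g :: rest => if g.contains name then g else aliasesLoop name rest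

def aliases (name : String) : List String := aliasesLoop name aliasGroups

-- ===== PORT B =====
-- _TABLE of Source B: (alias, group) pairs sorted lexicographically by alias
def aliasTable : List (String × List String) :=
  [ ("cl",             ["cl", "classifier", "classification"]),
    ("classification", ["cl", "classifier", "classification"]),
    ("classifier",     ["cl", "classifier", "classification"]),
    ("n_cores",        ["n_jobs", "num_cores", "thread_count", "n_cores"]),
    ("n_jobs",         ["n_jobs", "num_cores", "thread_count", "n_cores"]),
    ("num_cores",      ["n_jobs", "num_cores", "thread_count", "n_cores"]),
    ("random_seed",    ["random_state", "seed", "random_seed"]),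
    ("random_state",   ["random_state", "seed", "random_seed"]),
    ("reg",            ["reg", "regressor", "regression"]),
    ("regression",     ["reg", "regressor", "regression"]),
    ("regressor",      ["reg", "regressor", "regression"]),
    ("seed",           ["random_state", "seed", "random_seed"]),
    ("thread_count",   ["n_jobs", "num_cores", "thread_count", "n_cores"]),
    ("verbose",        ["verbose", "verbosity"]),
    ("verbosity",      ["verbose", "verbosity"]) ]

-- Source B's 'while lo < hi' binary-search loop; the fuel argument only makes the
-- recursion structural (it starts at table length + 1 and can never run out,
-- since hi - lo shrinks at every step), the computation is the loop's.
def bsearchAux (name : String) : Nat → Nat → Nat → List String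
  | 0, _, _ => []
  | fuel + 1, lo, hi =>
    if lo < hi then
      let mid := (lo + hi) / 2
      let p := aliasTable.getD mid ("", [])   -- _TABLE[mid]; mid is always in range here
      if p.1 < name then bsearchAux name fuel (mid + 1) hi
      else if name < p.1 then bsearchAux name fuel lo mid
      else p.2
    else []

def aliases_alt (name : String) : List String :=
  bsearchAux name (aliasTable.length + 1) 0 aliasTable.length

-- ===== PRECONDITION & SPEC =====
def Spec_aliases (name : String) (out : List String) : Prop := out = aliases_alt name
instance (name : String) (out : List String) : Decidable (Spec_aliases name out) := by unfold Spec_aliases; infer_instance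

-- ===== CLAIM (what is proved, stated in full; the proofs are below) =====
def Claim_equal_aliases : Prop := ∀ (name : String), Dom_aliases name → Spec_aliases name (aliases name)

-- ===== LEMMAS AND PROOFS =====

-- if name matches no key of the table, the binary search returns []
theorem bsearch_nomatch (name : String) (h : ∀ p ∈ aliasTable, p.1 ≠ name) :
    ∀ fuel lo hi, hi ≤ aliasTable.length → bsearchAux name fuel lo hi = [] := by
  intro fuel
  induction fuel with
  | zero => intro lo hi _; rfl
  | succ n ih =>
    intro lo hi hhi
    rw [bsearchAux]
    by_cases hlt : lo < hi
    · simp only [if_pos hlt]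
      have hmid : (lo + hi) / 2 < aliasTable.length := by
        have : (lo + hi) / 2 < hi := by omega
        omega
      have hmem : aliasTable.getD ((lo + hi) / 2) ("", []) ∈ aliasTable := by
        rw [List.getD_eq_getElem aliasTable ("", []) hmid]
        exact List.getElem_mem hmid
      by_cases h1 : (aliasTable.getD ((lo + hi) / 2) ("", [])).1 < name
      · simp only [if_pos h1]; exact ih _ _ hhi
      · simp only [if_neg h1]
        by_cases h2 : name < (aliasTable.getD ((lo + hi) / 2) ("", [])).1
        · simp only [if_pos h2]
          exact ih _ _ (by omega)
        · exact absurd (le_antisymm (not_lt.mp h2) (not_lt.mp h1)) (h _ hmem)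
    · simp [hlt]

-- ===== VERDICT (by name: the statement is the Claim_ definition above) =====
theorem aliases_spec : Claim_equal_aliases := by
  intro name _
  unfold Spec_aliases
  by_cases h1 : name = "cl"
  · subst h1; simp [aliases, aliases_alt, bsearchAux, aliasTable, aliasGroups, aliasesLoop] <;> decide
  by_cases h2 : name = "classifier"
  · subst h2; simp [aliases, aliases_alt, bsearchAux, aliasTable, aliasGroups, aliasesLoop] <;> decide
  by_cases h3 : name = "classification"
  · subst h3; simp [aliases, aliases_alt, bsearchAux, aliasTable, aliasGroups, aliasesLoop] <;> decide
  by_cases h4 : name = "reg"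
  · subst h4; simp [aliases, aliases_alt, bsearchAux, aliasTable, aliasGroups, aliasesLoop] <;> decide
  by_cases h5 : name = "regressor"
  · subst h5; simp [aliases, aliases_alt, bsearchAux, aliasTable, aliasGroups, aliasesLoop] <;> decide
  by_cases h6 : name = "regression"
  · subst h6; simp [aliases, aliases_alt, bsearchAux, aliasTable, aliasGroups, aliasesLoop] <;> decide
  by_cases h7 : name = "n_jobs"
  · subst h7; simp [aliases, aliases_alt, bsearchAux, aliasTable, aliasGroups, aliasesLoop] <;> decide
  by_cases h8 : name = "num_cores"
  · subst h8; simp [aliases, aliases_alt, bsearchAux, aliasTable, aliasGroups, aliasesLoop] <;> decide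
  by_cases h9 : name = "thread_count"
  · subst h9; simp [aliases, aliases_alt, bsearchAux, aliasTable, aliasGroups, aliasesLoop] <;> decide
  by_cases h10 : name = "n_cores"
  · subst h10; simp [aliases, aliases_alt, bsearchAux, aliasTable, aliasGroups, aliasesLoop] <;> decide
  by_cases h11 : name = "verbose"
  · subst h11; simp [aliases, aliases_alt, bsearchAux, aliasTable, aliasGroups, aliasesLoop] <;> decide
  by_cases h12 : name = "verbosity"
  · subst h12; simp [aliases, aliases_alt, bsearchAux, aliasTable, aliasGroups, aliasesLoop] <;> decide
  by_cases h13 : name = "random_state"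
  · subst h13; simp [aliases, aliases_alt, bsearchAux, aliasTable, aliasGroups, aliasesLoop] <;> decide
  by_cases h14 : name = "seed"
  · subst h14; simp [aliases, aliases_alt, bsearchAux, aliasTable, aliasGroups, aliasesLoop] <;> decide
  by_cases h15 : name = "random_seed"
  · subst h15; simp [aliases, aliases_alt, bsearchAux, aliasTable, aliasGroups, aliasesLoop] <;> decide
  -- name is none of the 15 aliases: both sides return []
  have hB : aliases_alt name = [] := by
    apply bsearch_nomatch name _ _ _ _ (le_refl _)
    intro p hp
    fin_cases hp <;> simp_all [Ne, eq_comm]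
  rw [hB]
  unfold aliases
  simp only [aliasGroups, aliasesLoop, List.contains, List.elem,
    beq_eq_false_iff_ne.mpr h1, beq_eq_false_iff_ne.mpr (Ne.symm h1), beq_eq_false_iff_ne.mpr h2, beq_eq_false_iff_ne.mpr (Ne.symm h2), beq_eq_false_iff_ne.mpr h3, beq_eq_false_iff_ne.mpr (Ne.symm h3), beq_eq_false_iff_ne.mpr h4, beq_eq_false_iff_ne.mpr (Ne.symm h4), beq_eq_false_iff_ne.mpr h5, beq_eq_false_iff_ne.mpr (Ne.symm h5), beq_eq_false_iff_ne.mpr h6, beq_eq_false_iff_ne.mpr (Ne.symm h6), beq_eq_false_iff_ne.mpr h7, beq_eq_false_iff_ne.mpr (Ne.symm h7), beq_eq_false_iff_ne.mpr h8, beq_eq_false_iff_ne.mpr (Ne.symm h8), beq_eq_false_iff_ne.mpr h9, beq_eq_false_iff_ne.mpr (Ne.symm h9), beq_eq_false_iff_ne.mpr h10, beq_eq_false_iff_ne.mpr (Ne.symm h10), beq_eq_false_iff_ne.mpr h11, beq_eq_false_iff_ne.mpr (Ne.symm h11), beq_eq_false_iff_ne.mpr h12, beq_eq_false_iff_ne.mpr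 (Ne.symm h12), beq_eq_false_iff_ne.mpr h13, beq_eq_false_iff_ne.mpr (Ne.symm h13), beq_eq_false_iff_ne.mpr h14, beq_eq_false_iff_ne.mpr (Ne.symm h14), beq_eq_false_iff_ne.mpr h15, beq_eq_false_iff_ne.mpr (Ne.symm h15)]
  rfl
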